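-- pv_equiv track=rewrite | github.com/sukminc/hero-performance-os | app/api/hand_matrix.py | _extract_preflop_pattern
-- ===== SOURCE A (Python) =====
-- def _extract_preflop_pattern(block: list[str]) -> tuple[str | None, bool]:
--     in_preflop = False
--     faced_action = False
--     for row in block:
--         if row == "*** HOLE CARDS ***":
--             in_preflop = True
--             continue
--         if not in_preflop:
--             continue
--         if row.startswith("*** FLOP ***") or row.startswith("*** SHOWDOWN ***") or row.startswith("*** SUMMARY ***"):
--             break
--         if row.startswith("Hero:"):
--             if " folds" in row:
--                 return ("fold", faced_action)
--             if " calls " in row: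
--                 return ("call", faced_action)
--             if " raises " in row:
--                 return ("jam" if "all-in" in row else "raise", faced_action)
--             return ("other", faced_action)
--         if ":" in row and any(token in row for token in (" raises ", " calls ", " bets ")):
--             actor = row.split(":", 1)[0]
--             if actor != "Hero":
--                 faced_action = True
--     return (None, faced_action)
-- ===== SOURCE B (Python) =====
-- _STOPS = ("*** FLOP ***", "*** SHOWDOWN ***", "*** SUMMARY ***")
--
--
-- def _is_opp_action(r):
--     return (":" in r
--             and any(t in r for t in (" raises ", " calls ", " bets "))
--             and r.split(":", 1)[0] != "Hero")
--
--
-- def _extract_preflop_pattern(block):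
--     try:
--         start = block.index("*** HOLE CARDS ***") + 1
--     except ValueError:
--         return (None, False)
--     pre = []
--     for r in block[start:]:
--         if r.startswith(_STOPS):
--             break
--         pre.append(r)
--     hero_idx = next((i for i, r in enumerate(pre) if r.startswith("Hero:")), len(pre))
--     faced = any(_is_opp_action(r) for r in pre[:hero_idx])
--     if hero_idx == len(pre):
--         return (None, faced)
--     row = pre[hero_idx]
--     if " folds" in row:
--         return ("fold", faced)
--     if " calls " in row:
--         return ("call", faced)
--     if " raises " in row:
--         return ("jam" if "all-in" in row else "raise", faced)
--     return ("other", faced)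
-- ===== Notes on version B (the rewrite author's own statement) =====
-- stated objective: simpler
-- what changed: A's single stateful pass with in_preflop/faced flags is replaced by a decomposition: find the HOLE CARDS marker with list.index, slice out the preflop region up to the first street/summary marker, then compute Hero's first action line and the faced-action flag by separate scans of that slice.
import Mathlib
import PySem

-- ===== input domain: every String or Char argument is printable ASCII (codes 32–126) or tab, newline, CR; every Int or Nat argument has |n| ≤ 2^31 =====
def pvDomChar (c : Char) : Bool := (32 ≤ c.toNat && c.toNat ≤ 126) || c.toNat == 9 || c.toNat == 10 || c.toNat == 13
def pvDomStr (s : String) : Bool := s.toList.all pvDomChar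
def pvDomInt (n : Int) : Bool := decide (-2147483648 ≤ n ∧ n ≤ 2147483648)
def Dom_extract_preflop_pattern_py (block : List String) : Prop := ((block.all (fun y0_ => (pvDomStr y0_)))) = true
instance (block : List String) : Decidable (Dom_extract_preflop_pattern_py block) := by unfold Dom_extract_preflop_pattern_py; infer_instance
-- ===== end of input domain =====

-- B replaces A's one-pass three-flag state machine by a decomposition: locate the
-- '*** HOLE CARDS ***' marker, collect the preflop slice up to the first street/summary
-- marker, then determine Hero's first action line and the faced-action flag by separate
-- scans of that slice (objective: simpler decomposition, same cost).


-- ===== PORT A =====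
-- actor = row.split(":", 1)[0]  (split never returns none/[] since sep ≠ "" — the match is the [0])
def pvActorA (row : String) : String :=
  match PySem.Str.splitMax? row ":" 1 with
  | some (a :: _) => a
  | _ => ""

def pvLoopA : List String → Bool → Bool → Option String × Bool
  | [], _, faced => (none, faced)
  | row :: rest, inp, faced =>
    if row = "*** HOLE CARDS ***" then pvLoopA rest true faced
    else if !inp then pvLoopA rest inp faced
    else if PySem.Str.startswith row "*** FLOP ***" || PySem.Str.startswith row "*** SHOWDOWN ***" || PySem.Str.startswith row "*** SUMMARY ***" then (none, faced)
    else if PySem.Str.startswith row "Hero:" then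
      if PySem.Str.isIn " folds" row then (some "fold", faced)
      else if PySem.Str.isIn " calls " row then (some "call", faced)
      else if PySem.Str.isIn " raises " row then
        (if PySem.Str.isIn "all-in" row then some "jam" else some "raise", faced)
      else (some "other", faced)
    else if PySem.Str.isIn ":" row && (PySem.Str.isIn " raises " row || PySem.Str.isIn " calls " row || PySem.Str.isIn " bets " row) then
      if pvActorA row != "Hero" then pvLoopA rest inp true else pvLoopA rest inp faced
    else pvLoopA rest inp faced

def extract_preflop_pattern_py (block : List String) : Option String × Bool :=
  pvLoopA block false false

-- ===== PORT B =====
def pvStopB (r : String) : Bool :=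
  PySem.Str.startswith r "*** FLOP ***" || PySem.Str.startswith r "*** SHOWDOWN ***" || PySem.Str.startswith r "*** SUMMARY ***"

-- the 'for r in block[start:]: if stop: break; pre.append(r)' loop
def pvCollectB : List String → List String
  | [] => []
  | r :: rest => if pvStopB r then [] else r :: pvCollectB rest

def pvIsOppActionB (r : String) : Bool :=
  PySem.Str.isIn ":" r && (PySem.Str.isIn " raises " r || PySem.Str.isIn " calls " r || PySem.Str.isIn " bets " r)
    && ((match PySem.Str.splitMax? r ":" 1 with
         | some (a :: _) => a
         | _ => "") != "Hero")

def pvHeroB (r : String) : Bool := PySem.Str.startswith r "Hero:"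

def pvClassifyB (row : String) (faced : Bool) : Option String × Bool :=
  if PySem.Str.isIn " folds" row then (some "fold", faced)
  else if PySem.Str.isIn " calls " row then (some "call", faced)
  else if PySem.Str.isIn " raises " row then
    (if PySem.Str.isIn "all-in" row then some "jam" else some "raise", faced)
  else (some "other", faced)

def pvFinishB (pre : List String) : Option String × Bool :=
  let heroIdx := pre.findIdx pvHeroB          -- next(…, len(pre)): findIdx is length when absent
  let faced := (pre.take heroIdx).any pvIsOppActionB
  if heroIdx = pre.length then (none, faced)
  else pvClassifyB (pre.getD heroIdx "") faced

def extract_preflop_pattern_py_alt (block : List String) : Option String × Bool :=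
  match PySem.List.index? block "*** HOLE CARDS ***" with
  | none => (none, false)
  | some i => pvFinishB (pvCollectB (block.drop (i + 1)))

-- ===== PRECONDITION & SPEC =====
def Spec_extract_preflop_pattern_py (block : List String) (out : Option String × Bool) : Prop := out = extract_preflop_pattern_py_alt block
instance (block : List String) (out : Option String × Bool) : Decidable (Spec_extract_preflop_pattern_py block out) := by unfold Spec_extract_preflop_pattern_py; infer_instance

-- ===== CLAIM (what is proved, stated in full; the proofs are below) =====
def Claim_equal_extract_preflop_pattern_py : Prop := ∀ (block : List String), Dom_extract_preflop_pattern_py block → Spec_extract_preflop_pattern_py block (extract_preflop_pattern_py block)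

-- ===== LEMMAS AND PROOFS =====

-- pvFinishB with an accumulated faced flag, for the loop invariant
def pvFinishW (faced : Bool) (pre : List String) : Option String × Bool :=
  let heroIdx := pre.findIdx pvHeroB
  let faced' := faced || (pre.take heroIdx).any pvIsOppActionB
  if heroIdx = pre.length then (none, faced')
  else pvClassifyB (pre.getD heroIdx "") faced'

theorem pvFinishW_false (pre : List String) : pvFinishW false pre = pvFinishB pre := by
  simp [pvFinishW, pvFinishB]

theorem pvFinishW_cons_not_hero (r : String) (pre : List String) (faced : Bool)
    (h : pvHeroB r = false) :
    pvFinishW faced (r :: pre) = pvFinishW (faced || pvIsOppActionB r) pre := by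
  simp [pvFinishW, List.findIdx_cons, h, Bool.or_assoc]

theorem pvFinishW_cons_hero (r : String) (pre : List String) (faced : Bool)
    (h : pvHeroB r = true) :
    pvFinishW faced (r :: pre) = pvClassifyB r faced := by
  simp [pvFinishW, List.findIdx_cons, h]

-- Inner phase: once '*** HOLE CARDS ***' has been seen, A's loop equals B's slice-based scan.
theorem pvInner (l : List String) : ∀ faced, pvLoopA l true faced = pvFinishW faced (pvCollectB l) := by
  induction l with
  | nil => intro faced; simp [pvLoopA, pvCollectB, pvFinishW]
  | cons r rest ih =>
    intro faced
    by_cases hm : r = "*** HOLE CARDS ***"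
    · subst hm
      rw [pvLoopA, if_pos rfl, ih]
      have hs : pvStopB "*** HOLE CARDS ***" = false := by decide
      have hh : pvHeroB "*** HOLE CARDS ***" = false := by decide
      have ho : pvIsOppActionB "*** HOLE CARDS ***" = false := by decide
      rw [pvCollectB, if_neg (by simp [hs]), pvFinishW_cons_not_hero _ _ _ hh, ho, Bool.or_false]
    · rw [pvLoopA, if_neg hm, pvCollectB]
      simp only [Bool.not_true, Bool.false_eq_true, if_false]
      by_cases hs : pvStopB r = true
      · have hsA : (PySem.Str.startswith r "*** FLOP ***" || PySem.Str.startswith r "*** SHOWDOWN ***" || PySem.Str.startswith r "*** SUMMARY ***") = true := by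
          simpa [pvStopB] using hs
        rw [if_pos hsA, if_pos hs]
        simp [pvFinishW]
      · have hs' : pvStopB r = false := by simpa using hs
        have hsA : (PySem.Str.startswith r "*** FLOP ***" || PySem.Str.startswith r "*** SHOWDOWN ***" || PySem.Str.startswith r "*** SUMMARY ***") = false := by
          simpa [pvStopB] using hs'
        simp only [hsA, hs', Bool.false_eq_true, if_false]
        by_cases hh : PySem.Str.startswith r "Hero:" = true
        · rw [if_pos hh, pvFinishW_cons_hero _ _ _ (by simpa [pvHeroB] using hh)]
          rfl
        · have hh' : pvHeroB r = false := by simpa [pvHeroB] using hh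
          rw [if_neg hh, pvFinishW_cons_not_hero _ _ _ hh', ← ih]
          by_cases hc : (PySem.Str.isIn ":" r && (PySem.Str.isIn " raises " r || PySem.Str.isIn " calls " r || PySem.Str.isIn " bets " r)) = true
          · rw [if_pos hc]
            by_cases ha : (pvActorA r != "Hero") = true
            · have ho : pvIsOppActionB r = true := by
                rw [pvActorA] at ha
                simp only [pvIsOppActionB, hc, Bool.true_and]
                exact ha
              rw [if_pos ha, ho, Bool.or_true]
            · have ha' : (pvActorA r != "Hero") = false := by simpa using ha
              have ho : pvIsOppActionB r = false := by
                rw [pvActorA] at ha'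
                simp only [pvIsOppActionB, hc, Bool.true_and]
                exact ha'
              rw [if_neg ha, ho, Bool.or_false]
          · have hc' : (PySem.Str.isIn ":" r && (PySem.Str.isIn " raises " r || PySem.Str.isIn " calls " r || PySem.Str.isIn " bets " r)) = false := by
              simpa using hc
            have ho : pvIsOppActionB r = false := by
              simp only [pvIsOppActionB, hc', Bool.false_and]
            rw [if_neg hc, ho, Bool.or_false]

-- Outer phase: before the marker A skips every row; B's index? finds the same marker.
theorem pvOuter (l : List String) : pvLoopA l false false = extract_preflop_pattern_py_alt l := by
  induction l with
  | nil => simp [pvLoopA, extract_preflop_pattern_py_alt, PySem.List.index?_eq_idxOf?, List.idxOf?]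
  | cons r rest ih =>
    by_cases hm : r = "*** HOLE CARDS ***"
    · subst hm
      rw [pvLoopA, if_pos rfl, pvInner, pvFinishW_false]
      have h0 : PySem.List.index? ("*** HOLE CARDS ***" :: rest) "*** HOLE CARDS ***" = some 0 :=
        PySem.List.index?_cons_self _ _
      rw [PySem.List.index?_eq_idxOf?] at h0
      simp [extract_preflop_pattern_py_alt, h0]
    · rw [pvLoopA, if_neg hm]
      simp only [Bool.not_false, ih]
      simp only [extract_preflop_pattern_py_alt, PySem.List.index?_cons_of_ne _ hm]
      cases h : PySem.List.index? rest "*** HOLE CARDS ***" <;>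
        simp [List.drop_succ_cons]

-- ===== VERDICT (by name: the statement is the Claim_ definition above) =====
theorem extract_preflop_pattern_py_spec : Claim_equal_extract_preflop_pattern_py := by
  intro block _
  unfold Spec_extract_preflop_pattern_py extract_preflop_pattern_py
  exact pvOuter block
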